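-- pv_equiv track=rewrite | github.com/rsaleksandrov/YandexAlgorithm | Sprint_08_Final/B_CheatSheet (test).py | checkStr2
-- ===== SOURCE A (Python) =====
-- def checkStr2(s, substr):
--     tmps = s
--     isCorrect = True
--     # delstr = []
--     while len(tmps) > 0 and isCorrect:
--         tmpCorrect = False
--         maxlen = 0
--         # tmpdelstr = ''
--         for w in substr:
--             chstr = tmps[-len(w):]
--             if chstr == w:
--                 if len(w) > maxlen:
--                     maxlen = len(w)
--                     # tmpdelstr = w
--                 tmpCorrect = True
--         isCorrect = tmpCorrect
--         if tmpCorrect: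
--             tmps = tmps[:-maxlen]
--             # delstr.append(tmpdelstr)
--         # else:
--         #     isCorrect = False
--     return isCorrect
-- ===== SOURCE B (Python) =====
-- def checkStr2(s, substr):
--     # Staged passes: one occurrence scan per word (str.find) builds a table of the
--     # longest dictionary word ending at each position; then walk an index pointer.
--     n = len(s)
--     best = [0] * (n + 1)
--     for w in substr:
--         L = len(w)
--         if L == 0:
--             continue
--         p = s.find(w)
--         while p != -1:
--             if L > best[p + L]:
--                 best[p + L] = L
--             p = s.find(w, p + 1)
--     i = n
--     while i > 0:
--         if best[i] == 0:
--             return False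
--         i -= best[i]
--     return True
-- ===== Notes on version B (the rewrite author's own statement) =====
-- stated objective: faster
-- what changed: Replaces A's interleaved greedy loop (rescanning every word against the current suffix and copying the whole remaining string at each step) with two staged passes: one str.find occurrence scan per word builds a table of the longest word ending at each position, then a plain index-pointer walk reads the table with no matching or copying per step.
import Mathlib
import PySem

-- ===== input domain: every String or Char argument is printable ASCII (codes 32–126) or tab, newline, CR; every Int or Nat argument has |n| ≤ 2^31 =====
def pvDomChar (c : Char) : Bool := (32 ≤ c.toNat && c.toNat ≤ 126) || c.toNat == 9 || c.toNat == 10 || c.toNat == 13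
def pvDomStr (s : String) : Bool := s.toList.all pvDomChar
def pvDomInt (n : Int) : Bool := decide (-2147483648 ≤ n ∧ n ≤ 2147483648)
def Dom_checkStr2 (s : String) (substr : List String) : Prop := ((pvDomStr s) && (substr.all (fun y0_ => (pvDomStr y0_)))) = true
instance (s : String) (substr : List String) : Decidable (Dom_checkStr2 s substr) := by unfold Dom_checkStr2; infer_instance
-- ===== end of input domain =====

-- B replaces A's per-step rescan of the word list (and per-step string copy) by two staged
-- passes: an occurrence scan per word (str.find) builds a table of the longest word ending at
-- each position once, then a plain index-pointer walk reads the table (faster on step-heavy inputs).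

-- ===== PORT A =====
-- inner 'for w in substr' loop: (tmpCorrect, maxlen)
def stepA (ws : List (List Char)) (tmps : List Char) : Bool × Nat :=
  ws.foldl (fun st w =>
    if PySem.List.slice tmps (some (-(w.length : Int))) none == w then
      (true, if w.length > st.2 then w.length else st.2)
    else st) (false, 0)

-- the 'while' loop; fuel only makes the recursion structural (never exhausted for fuel > |tmps|)
def loopA (ws : List (List Char)) : Nat → List Char → Bool → Bool
  | 0, _, isCorrect => isCorrect
  | fuel + 1, tmps, isCorrect =>
    if 0 < tmps.length && isCorrect then
      let st := stepA ws tmps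
      loopA ws fuel
        (if st.1 then PySem.List.slice tmps none (some (-(st.2 : Int))) else tmps) st.1
    else isCorrect

def checkStr2 (s : String) (substr : List String) : Bool :=
  loopA (substr.map String.toList) (s.toList.length + 1) s.toList true

-- ===== PORT B =====
-- 'p = s.find(w); while p != -1: …; p = s.find(w, p + 1)' — the occurrence scan for one word;
-- fuel only makes the loop structural (p strictly increases, so fuel = |s| + 2 is never exhausted)
def markLoop (sl w : List Char) : Nat → Int → List Nat → List Nat
  | 0, _, best => best
  | fuel + 1, p, best =>
    if p ≠ -1 then
      let e := (p + (w.length : Int)).toNat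
      markLoop sl w fuel (PySem.Chars.findFrom sl w (p + 1))
        (if w.length > best.getD e 0 then best.set e w.length else best)
    else best

-- 'best = [0] * (n + 1); for w in substr: …' — the table-building pass
def buildB (sl : List Char) (ws : List (List Char)) : List Nat :=
  ws.foldl (fun best w =>
    if w.length = 0 then best
    else markLoop sl w (sl.length + 2) (PySem.Chars.find sl w) best)
    (List.replicate (sl.length + 1) 0)

-- 'i = n; while i > 0: …' — the pointer walk; fuel never exhausted for fuel > i
def walkB (best : List Nat) : Nat → Nat → Bool
  | 0, i => decide (i = 0)
  | fuel + 1, i =>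
    if 0 < i then
      if best.getD i 0 = 0 then false else walkB best fuel (i - best.getD i 0)
    else true

def checkStr2_alt (s : String) (substr : List String) : Bool :=
  walkB (buildB s.toList (substr.map String.toList)) (s.toList.length + 1) s.toList.length

-- ===== PRECONDITION & SPEC =====
def Spec_checkStr2 (s : String) (substr : List String) (out : Bool) : Prop := out = checkStr2_alt s substr
instance (s : String) (substr : List String) (out : Bool) : Decidable (Spec_checkStr2 s substr out) := by unfold Spec_checkStr2; infer_instance

-- ===== CLAIM (what is proved, stated in full; the proofs are below) =====
def Claim_equal_checkStr2 : Prop := ∀ (s : String) (substr : List String), Dom_checkStr2 s substr → Spec_checkStr2 s substr (checkStr2 s substr)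

-- ===== LEMMAS AND PROOFS =====

-- A's match test for word w against the current suffix string
def pA (tmps : List Char) (w : List Char) : Bool :=
  PySem.List.slice tmps (some (-(w.length : Int))) none == w

theorem stepA_foldl (ws : List (List Char)) (tmps : List Char) (st : Bool × Nat) :
    ws.foldl (fun st w =>
      if PySem.List.slice tmps (some (-(w.length : Int))) none == w then
        (true, if w.length > st.2 then w.length else st.2)
      else st) st
    = (st.1 || !(ws.filter (pA tmps)).isEmpty,
       ((ws.filter (pA tmps)).map List.length).foldl max st.2) := by
  induction ws generalizing st with
  | nil => simp
  | cons w ws ih =>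
    simp only [List.foldl_cons, List.filter_cons, pA]
    by_cases h : PySem.List.slice tmps (some (-(w.length : Int))) none == w
    · simp only [h, if_pos, ih]
      simp [Nat.max_def]
      congr 1
      split_ifs <;> omega
    · simp only [h, ih]
      simp_all

theorem pA_iff (sl : List Char) (i : Nat) (hi : i ≤ sl.length) (hpos : 0 < i) (w : List Char) :
    pA (sl.take i) w = true ↔ 0 < w.length ∧ w.length ≤ i ∧ w = (sl.drop (i - w.length)).take w.length := by
  unfold pA
  rcases Nat.eq_zero_or_pos w.length with h0 | h0
  · rw [List.length_eq_zero_iff] at h0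
    subst h0
    simp only [List.length_nil, Nat.cast_zero, neg_zero]
    rw [show ((some (0:Int)) = some ((0:Nat):Int)) by norm_num, PySem.List.slice_from_natCast]
    have hne : sl.take i ≠ [] := by
      intro h
      have := congrArg List.length h
      rw [List.length_take] at this
      simp only [List.length_nil] at this
      omega
    constructor
    · intro h
      rw [List.drop_zero, beq_iff_eq] at h
      exact absurd h hne
    · rintro ⟨h, -, -⟩
      omega
  · rw [PySem.List.slice_from_neg_natCast _ _ h0]
    have hlen : (sl.take i).length = i := by
      rw [List.length_take]
      omega
    by_cases hle : w.length ≤ i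
    · rw [hlen, List.drop_take]
      have : i - (i - w.length) = w.length := by omega
      rw [this, beq_iff_eq]
      constructor
      · intro h
        exact ⟨h0, hle, h.symm⟩
      · rintro ⟨-, -, h⟩
        exact h.symm
    · have hdrop : (sl.take i).drop ((sl.take i).length - w.length) = sl.take i := by
        rw [hlen]
        have : i - w.length = 0 := by omega
        simp [this]
      rw [hdrop]
      simp only [beq_iff_eq]
      constructor
      · intro h
        have := congrArg List.length h
        rw [hlen] at this
        omega
      · intro h
        omega

-- the running max over the matching lengths: attained and an upper bound
theorem mm_spec (fl : List (List Char)) (hfl : fl ≠ [])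
    (hpos : ∀ w ∈ fl, 0 < w.length) :
    (∃ w ∈ fl, w.length = (fl.map List.length).foldl max 0) ∧
      ∀ w ∈ fl, w.length ≤ (fl.map List.length).foldl max 0 := by
  have hub : ∀ y ∈ fl.map List.length, y ≤ (fl.map List.length).foldl max 0 :=
    (PySem.List.le_foldl_max (fl.map List.length) 0).2
  have hmem := PySem.List.foldl_max_mem (fl.map List.length) 0
  constructor
  · rcases hmem with h0 | hin
    · obtain ⟨w, hw⟩ := List.exists_mem_of_ne_nil fl hfl
      have h1 := hub w.length (List.mem_map_of_mem hw)
      have := hpos w hw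
      omega
    · obtain ⟨w, hw, hwl⟩ := List.mem_map.mp hin
      exact ⟨w, hw, hwl⟩
  · intro w hw
    exact hub w.length (List.mem_map_of_mem hw)

-- 'w occurs in sl somewhere at or after position k' unpacked to a start index
theorem infix_drop_iff (sl w : List Char) (k : Nat) :
    w <:+: sl.drop k ↔ ∃ j, k ≤ j ∧ w <+: sl.drop j := by
  constructor
  · intro h
    obtain ⟨t, hpre, hsuf⟩ := List.infix_iff_prefix_suffix.mp h
    obtain ⟨u, hu⟩ := hsuf
    refine ⟨k + u.length, by omega, ?_⟩
    have : List.drop (k + u.length) sl = List.drop u.length (List.drop k sl) := by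
      rw [List.drop_drop]
    rw [this, ← hu, List.drop_left' rfl]
    exact hpre
  · rintro ⟨j, hkj, hpre⟩
    have : List.drop j sl = List.drop (j - k) (List.drop k sl) := by
      rw [List.drop_drop]
      congr 1
      omega
    rw [this] at hpre
    exact hpre.isInfix.trans (List.drop_suffix (j - k) (sl.drop k)).isInfix

theorem markLoop_length (sl w : List Char) (fuel : Nat) (p : Int) (best : List Nat) :
    (markLoop sl w fuel p best).length = best.length := by
  induction fuel generalizing p best with
  | zero => rfl
  | succ f ih =>
    unfold markLoop
    split_ifs with h
    · rw [ih]
      split_ifs <;> simp [List.length_set]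
    · rfl

-- getD through a set at another index / the same index
theorem getD_set_self (l : List Nat) (i : Nat) (v : Nat) (h : i < l.length) :
    (l.set i v).getD i 0 = v := by
  unfold List.getD
  rw [List.getElem?_set_self h]
  rfl

theorem getD_set_ne (l : List Nat) (i j : Nat) (v : Nat) (h : i ≠ j) :
    (l.set i v).getD j 0 = l.getD j 0 := by
  unfold List.getD
  rw [List.getElem?_set_ne h]

-- the occurrence scan, pointwise: after scanning from start k, position e holds w.length
-- exactly when w ends at e (at a start ≥ k) and beats the old entry
theorem markLoop_getD (sl w : List Char) (hw : 0 < w.length) :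
    ∀ (fuel k : Nat) (best : List Nat), k ≤ sl.length → sl.length + 1 ≤ fuel + k →
      best.length = sl.length + 1 →
      ∀ e, e ≤ sl.length →
      (markLoop sl w fuel (PySem.Chars.findFrom sl w (k : Int)) best).getD e 0
        = if w.length ≤ e ∧ k ≤ e - w.length ∧ w <+: sl.drop (e - w.length) ∧ best.getD e 0 < w.length
          then w.length else best.getD e 0 := by
  intro fuel
  induction fuel with
  | zero =>
    intro k best hk hfuel hlen e he
    omega
  | succ f ih =>
    intro k best hk hfuel hlen e he
    by_cases hneg : PySem.Chars.findFrom sl w (k : Int) = -1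
    · rw [markLoop, if_neg (by simp [hneg])]
      have hno : ¬ w <:+: sl.drop k := (PySem.Chars.findFrom_natCast_eq_neg_one_iff sl w k hk).mp hneg
      rw [if_neg]
      rintro ⟨h1, h2, h3, h4⟩
      exact hno ((infix_drop_iff sl w k).mpr ⟨e - w.length, h2, h3⟩)
    · obtain ⟨hkp, hocc, hmin⟩ := PySem.Chars.findFrom_natCast_spec sl w k hk hneg
      set p : Int := PySem.Chars.findFrom sl w (k : Int) with hp
      have hp0 : 0 ≤ p := le_trans (by exact_mod_cast Nat.zero_le k) hkp
      set P : Nat := p.toNat with hP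
      have hpP : p = (P : Int) := by omega
      have hkP : k ≤ P := by omega
      have hPL : P + w.length ≤ sl.length := by
        have := hocc.length_le
        rw [List.length_drop] at this
        omega
      rw [markLoop]
      simp only [hneg, if_pos, ne_eq, not_false_iff]
      have he0 : (p + (w.length : Int)).toNat = P + w.length := by omega
      rw [he0]
      have hp1 : p + 1 = ((P + 1 : Nat) : Int) := by omega
      rw [hp1]
      set best' : List Nat :=
        if w.length > best.getD (P + w.length) 0 then best.set (P + w.length) w.length else best
        with hb'
      have hlen' : best'.length = sl.length + 1 := by
        rw [hb']
        split_ifs <;> simp [List.length_set, hlen]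
      have hres := ih (P + 1) best' (by omega) (by omega) hlen' e he
      rw [hres]
      by_cases heP : e = P + w.length
      · subst heP
        have heL : w.length ≤ P + w.length := by omega
        have hsub : P + w.length - w.length = P := by omega
        by_cases hbeat : best.getD (P + w.length) 0 < w.length
        · have hbv : best'.getD (P + w.length) 0 = w.length := by
            rw [hb', if_pos hbeat]
            exact getD_set_self _ _ _ (by omega)
          rw [if_neg (by rw [hbv]; omega)]
          rw [hbv, if_pos ⟨heL, by omega, by rw [hsub]; exact hocc, hbeat⟩]
        · have hbv : best'.getD (P + w.length) 0 = best.getD (P + w.length) 0 := by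
            rw [hb', if_neg (by omega)]
          rw [if_neg (by rw [hsub]; omega), hbv,
            if_neg (by rintro ⟨-, -, -, h4⟩; omega)]
      · have hbv : best'.getD e 0 = best.getD e 0 := by
          rw [hb']
          split_ifs with h
          · exact getD_set_ne _ _ _ _ (fun h' => heP h'.symm)
          · rfl
        rw [hbv]
        congr 1
        simp only [eq_iff_iff]
        constructor
        · rintro ⟨h1, h2, h3, h4⟩
          exact ⟨h1, by omega, h3, h4⟩
        · rintro ⟨h1, h2, h3, h4⟩
          refine ⟨h1, ?_, h3, h4⟩
          rcases Nat.lt_or_ge (e - w.length) P with hlt | hge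
          · exact absurd h3 (hmin (e - w.length) h2 hlt)
          · have : e - w.length ≠ P := by omega
            omega

-- the build pass, pointwise: folding the remaining words takes the running max
theorem build_fold_getD (sl : List Char) :
    ∀ (ws : List (List Char)) (best : List Nat), best.length = sl.length + 1 →
      ∀ e, 0 < e → e ≤ sl.length →
      (ws.foldl (fun best w =>
          if w.length = 0 then best
          else markLoop sl w (sl.length + 2) (PySem.Chars.find sl w) best) best).getD e 0
        = ((ws.filter (pA (sl.take e))).map List.length).foldl max (best.getD e 0) := by
  intro ws
  induction ws with
  | nil =>
    intro best hlen e he0 hen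
    simp
  | cons w ws ih =>
    intro best hlen e he0 hen
    simp only [List.foldl_cons, List.filter_cons]
    by_cases h0 : w.length = 0
    · have hpa : pA (sl.take e) w = false := by
        rw [Bool.eq_false_iff]
        intro h
        have := (pA_iff sl e hen he0 w).mp h
        omega
      rw [if_pos h0, hpa]
      simp only [Bool.false_eq_true, if_false]
      exact ih best hlen e he0 hen
    · rw [if_neg h0]
      have hfind : PySem.Chars.find sl w = PySem.Chars.findFrom sl w ((0 : Nat) : Int) := by
        rw [Nat.cast_zero, PySem.Chars.findFrom_zero]
      rw [hfind]
      have hml := markLoop_getD sl w (by omega) (sl.length + 2) 0 best (by omega) (by omega) hlen e hen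
      have hlen' : (markLoop sl w (sl.length + 2) (PySem.Chars.findFrom sl w ((0 : Nat) : Int)) best).length
          = sl.length + 1 := by
        rw [markLoop_length, hlen]
      rw [ih _ hlen' e he0 hen, hml]
      have hcond : (w.length ≤ e ∧ 0 ≤ e - w.length ∧ w <+: sl.drop (e - w.length))
          ↔ pA (sl.take e) w = true := by
        rw [pA_iff sl e hen he0 w]
        constructor
        · rintro ⟨h1, -, h3⟩
          exact ⟨by omega, h1, List.prefix_iff_eq_take.mp h3⟩
        · rintro ⟨h1, h2, h3⟩
          refine ⟨h2, by omega, ?_⟩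
          rw [List.prefix_iff_eq_take]
          exact h3
      by_cases hpa : pA (sl.take e) w = true
      · rw [hpa]
        simp only [if_pos, List.map_cons, List.foldl_cons]
        have hupd : (if w.length ≤ e ∧ 0 ≤ e - w.length ∧ w <+: sl.drop (e - w.length) ∧ best.getD e 0 < w.length
            then w.length else best.getD e 0) = max (best.getD e 0) w.length := by
          obtain ⟨h1, h2, h3⟩ := hcond.mpr hpa
          split_ifs with h
          · omega
          · have : ¬ best.getD e 0 < w.length := by
              intro hb
              exact h ⟨h1, h2, h3, hb⟩
            omega
        rw [hupd]
      · rw [Bool.eq_false_iff.mpr hpa]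
        simp only [Bool.false_eq_true, if_false]
        congr 1
        rw [if_neg]
        rintro ⟨h1, h2, h3, -⟩
        exact hpa (hcond.mp ⟨h1, h2, h3⟩)

theorem buildB_getD (sl : List Char) (ws : List (List Char)) (e : Nat) (he0 : 0 < e) (hen : e ≤ sl.length) :
    (buildB sl ws).getD e 0 = ((ws.filter (pA (sl.take e))).map List.length).foldl max 0 := by
  unfold buildB
  rw [build_fold_getD sl ws _ (by simp) e he0 hen, List.getD_replicate 0 (by omega)]

-- the core loop equivalence, by strong induction on the pointer i
theorem loop_eq (substr : List String) (sl : List Char) :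
    ∀ i fa fb, i ≤ sl.length → i < fa → i < fb →
      loopA (substr.map String.toList) fa (sl.take i) true
        = walkB (buildB sl (substr.map String.toList)) fb i := by
  intro i
  induction i using Nat.strong_induction_on with
  | _ i IH =>
    intro fa fb hi hfa hfb
    obtain ⟨fa', rfl⟩ : ∃ fa', fa = fa' + 1 := ⟨fa - 1, by omega⟩
    obtain ⟨fb', rfl⟩ : ∃ fb', fb = fb' + 1 := ⟨fb - 1, by omega⟩
    rcases Nat.eq_zero_or_pos i with rfl | hpos
    · simp [loopA, walkB]
    · have htlen : (sl.take i).length = i := by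
        rw [List.length_take]
        omega
      rw [loopA, walkB]
      rw [htlen]
      simp only [hpos, decide_true, Bool.true_and, if_true]
      have hstep : stepA (substr.map String.toList) (sl.take i)
          = (!((substr.map String.toList).filter (pA (sl.take i))).isEmpty,
             (((substr.map String.toList).filter (pA (sl.take i))).map List.length).foldl max 0) := by
        unfold stepA
        rw [stepA_foldl]
        simp
      have hflpos : ∀ w ∈ (substr.map String.toList).filter (pA (sl.take i)), 0 < w.length := by
        intro w hw
        rw [List.mem_filter] at hw
        exact ((pA_iff sl i hi hpos w).mp hw.2).1
      have htab := buildB_getD sl (substr.map String.toList) i hpos hi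
      by_cases hflnil : (substr.map String.toList).filter (pA (sl.take i)) = []
      · -- no word matches: A sets isCorrect := False; B reads a zero table entry
        have h0 : (buildB sl (substr.map String.toList)).getD i 0 = 0 := by
          rw [htab, hflnil]
          rfl
        rw [h0, hstep, hflnil]
        simp only [List.isEmpty_nil, Bool.not_true, Bool.false_eq_true, if_false]
        obtain ⟨fa'', rfl⟩ : ∃ k, fa' = k + 1 := ⟨fa' - 1, by omega⟩
        rw [loopA]
        simp
      · -- some word matches: both strip the longest matching length M
        obtain ⟨⟨wmax, hwmax, hwlen⟩, hub⟩ :=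
          mm_spec ((substr.map String.toList).filter (pA (sl.take i))) hflnil hflpos
        have hMpos : 0 < (((substr.map String.toList).filter (pA (sl.take i))).map List.length).foldl max 0 := by
          have := hflpos wmax hwmax
          omega
        have hMle : (((substr.map String.toList).filter (pA (sl.take i))).map List.length).foldl max 0 ≤ i := by
          rw [← hwlen]
          exact ((pA_iff sl i hi hpos wmax).mp (List.mem_filter.mp hwmax).2).2.1
        rw [htab, hstep]
        have hne : ((substr.map String.toList).filter (pA (sl.take i))).isEmpty = false := by
          simp [hflnil]
        rw [hne]
        simp only [Bool.not_false, if_true]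
        rw [if_neg (by omega)]
        have hslice : PySem.List.slice (sl.take i) none
            (some (-(((((substr.map String.toList).filter (pA (sl.take i))).map List.length).foldl max 0 : Nat) : Int)))
            = sl.take (i - (((substr.map String.toList).filter (pA (sl.take i))).map List.length).foldl max 0) := by
          rw [PySem.List.slice_to_neg_natCast _ _ hMpos, htlen, List.take_take]
          congr 1
          omega
        rw [hslice]
        exact IH _ (by omega) fa' fb' (by omega) (by omega) (by omega)

-- ===== VERDICT (by name: the statement is the Claim_ definition above) =====
theorem checkStr2_spec : Claim_equal_checkStr2 := by
  intro s substr _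
  unfold Spec_checkStr2 checkStr2 checkStr2_alt
  have h := loop_eq substr s.toList s.toList.length (s.toList.length + 1) (s.toList.length + 1)
    (le_refl _) (by omega) (by omega)
  rw [List.take_length] at h
  exact h
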